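-- pv_equiv track=rewrite | github.com/SmartestKen/public | trash/SS/q_major_new.py | subPartition
-- ===== SOURCE A (Python) =====
-- def subPartition(lda, curRow):
--
--     # base case, last row -> select or not select
--     if curRow == len(lda)-1:
--         mu1 = list(lda)
--         mu2 = list(lda)
--         mu2[-1] -= 1
--         if mu2[-1] == 0:
--             del mu2[-1]
--             return [mu1, mu2]
--         else:
--             return [mu1] + subPartition(mu2, curRow)
--
--     # not last row, if curRow not selectable
--     if lda[curRow] == lda[curRow+1]:
--         return subPartition(lda, curRow+1)
--     # else, can choose to
--     # not select and jump to next line, or select and stay at current line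
--     else:
--         mu2 = list(lda)
--         mu2[curRow] -= 1
--
--         return subPartition(lda, curRow+1) + subPartition(mu2, curRow)
-- ===== SOURCE B (Python) =====
-- def subPartition(lda, curRow):
--     # Iterative DFS with an explicit stack instead of recursion; same output order.
--     out = []
--     stack = [(list(lda), curRow)]
--     while stack:
--         p, r = stack.pop()
--         if r == len(p) - 1:
--             out.append(list(p))
--             mu2 = list(p)
--             mu2[-1] -= 1
--             if mu2[-1] == 0:
--                 del mu2[-1]
--                 out.append(mu2)
--             else:
--                 stack.append((mu2, r))
--         elif p[r] == p[r + 1]: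
--             stack.append((p, r + 1))
--         else:
--             mu2 = list(p)
--             mu2[r] -= 1
--             stack.append((mu2, r))
--             stack.append((p, r + 1))
--     return out
-- ===== Notes on version B (the rewrite author's own statement) =====
-- stated objective: alternative
-- what changed: A's branching recursion is replaced by an iterative depth-first search that maintains an explicit stack of (partition, row) states and appends finished sub-partitions to an output accumulator, with push order chosen to reproduce A's left-to-right output order.
-- outside the precondition, e.g. on subPartition([1], -1): A returns [[1], []], B returns [[1], []]
import Mathlib
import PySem

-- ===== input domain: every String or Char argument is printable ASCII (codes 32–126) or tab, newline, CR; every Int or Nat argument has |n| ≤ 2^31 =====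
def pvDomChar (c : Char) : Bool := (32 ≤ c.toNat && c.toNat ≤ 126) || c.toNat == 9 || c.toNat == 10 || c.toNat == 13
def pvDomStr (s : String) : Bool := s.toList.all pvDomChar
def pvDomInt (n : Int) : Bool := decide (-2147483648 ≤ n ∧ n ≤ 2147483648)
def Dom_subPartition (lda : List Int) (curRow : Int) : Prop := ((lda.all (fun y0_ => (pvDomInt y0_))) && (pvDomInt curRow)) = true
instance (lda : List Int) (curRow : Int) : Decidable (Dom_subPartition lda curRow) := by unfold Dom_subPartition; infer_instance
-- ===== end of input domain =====

-- B replaces A's recursion by an iterative depth-first search over an explicit stack of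
-- (partition, row) states, emitting results into an accumulator in the same order (objective: alternative).

-- ===== PORT A =====

-- mu2[-1] -= 1 on a copy of the list
def decLast : List Int → List Int
  | [] => []
  | [x] => [x - 1]
  | x :: y :: rest => x :: decLast (y :: rest)

-- mu2[curRow] -= 1 on a copy of the list (index = curRow.toNat; Pre_ gives 0 ≤ curRow)
def decAt : List Int → Nat → List Int
  | [], _ => []
  | x :: t, 0 => (x - 1) :: t
  | x :: t, k + 1 => x :: decAt t k

def sumAbs (xs : List Int) : Nat := (xs.map Int.natAbs).sum

-- fuel: an upper bound on A's recursion depth on every input Pre_ admits (a totality guard only)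
def fuelA (lda : List Int) (curRow : Int) : Nat :=
  sumAbs (lda.drop curRow.toNat) + lda.length + 1

def goA : Nat → List Int → Int → List (List Int)
  | 0, _, _ => []
  | f + 1, lda, r =>
    if r = (lda.length : Int) - 1 then
      let mu2 := decLast lda
      if mu2.getLastD 0 = 0 then [lda, mu2.dropLast]
      else lda :: goA f mu2 r
    else
      match PySem.List.pyGet? lda r, PySem.List.pyGet? lda (r + 1) with
      | some a, some b =>
        if a = b then goA f lda (r + 1)
        else goA f lda (r + 1) ++ goA f (decAt lda r.toNat) r
      | _, _ => []

def subPartition (lda : List Int) (curRow : Int) : List (List Int) :=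
  goA (fuelA lda curRow) lda curRow

-- ===== PORT B =====
-- the stack machine of Source B: pop a (partition, row) state, apply the case logic, push successors
def goB : Nat → List (List Int × Int) → List (List Int) → List (List Int)
  | 0, _, acc => acc
  | _ + 1, [], acc => acc
  | f + 1, (p, r) :: st, acc =>
    if r = (p.length : Int) - 1 then
      let mu2 := decLast p
      if mu2.getLastD 0 = 0 then goB f st (acc ++ [p, mu2.dropLast])
      else goB f ((mu2, r) :: st) (acc ++ [p])
    else
      match PySem.List.pyGet? p r, PySem.List.pyGet? p (r + 1) with
      | some a, some b =>
        if a = b then goB f ((p, r + 1) :: st) acc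
        else goB f ((p, r + 1) :: (decAt p r.toNat, r) :: st) acc
      | _, _ => goB f st acc

def subPartition_alt (lda : List Int) (curRow : Int) : List (List Int) :=
  goB (3 ^ (sumAbs (lda.drop curRow.toNat) + lda.length + 1)) [(lda, curRow)] []

-- ===== PRECONDITION & SPEC =====
-- Pre_ = the inputs on which the Python A terminates normally: a valid non-negative row index and
-- a weakly decreasing suffix ending in a positive part — on any other well-indexed input A's
-- decrement descent never reaches its stopping value and CPython raises RecursionError (or
-- IndexError for curRow ≥ len(lda)); negative curRow, where A's value comes from Python's
-- accidental negative-index wraparound, is excluded as a defensible corner (see the cited example).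

def Pre_subPartition (lda : List Int) (curRow : Int) : Prop :=
  0 ≤ curRow ∧ curRow < (lda.length : Int) ∧
  (lda.drop curRow.toNat).IsChain (fun a b => b ≤ a) ∧
  1 ≤ (lda.drop curRow.toNat).getLastD 0

instance (lda : List Int) (curRow : Int) : Decidable (Pre_subPartition lda curRow) := by unfold Pre_subPartition; infer_instance

def pvWitness_subPartition : List Int × Int := ([3, 2, 2, 1], 0)

def Spec_subPartition (lda : List Int) (curRow : Int) (out : List (List Int)) : Prop := out = subPartition_alt lda curRow
instance (lda : List Int) (curRow : Int) (out : List (List Int)) : Decidable (Spec_subPartition lda curRow out) := by unfold Spec_subPartition; infer_instance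

-- ===== CLAIM (what is proved, stated in full; the proofs are below) =====
def Claim_equal_subPartition : Prop := ∀ (lda : List Int) (curRow : Int), Dom_subPartition lda curRow → Pre_subPartition lda curRow → Spec_subPartition lda curRow (subPartition lda curRow)

-- ===== LEMMAS AND PROOFS =====

-- the loop invariant: valid row, weakly decreasing suffix, positive last part

def InvSP (p : List Int) (r : Int) : Prop :=
  0 ≤ r ∧ r.toNat < p.length ∧
  (p.drop r.toNat).IsChain (fun a b => b ≤ a) ∧
  1 ≤ (p.drop r.toNat).getLastD 0

-- the termination measure: suffix sum plus suffix length
def M (p : List Int) (r : Int) : Nat :=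
  ((p.drop r.toNat).map Int.toNat).sum + (p.length - r.toNat)

theorem decLast_eq (p : List Int) (h : p ≠ []) :
    decLast p = p.dropLast ++ [p.getLastD 0 - 1] := by
  induction p with
  | nil => simp at h
  | cons x t ih =>
    cases t with
    | nil => simp [decLast]
    | cons y u => simpa [decLast] using ih (by simp)

theorem length_decLast (p : List Int) : (decLast p).length = p.length := by
  induction p with
  | nil => rfl
  | cons x t ih =>
    cases t with
    | nil => rfl
    | cons y u => simpa [decLast] using ih

theorem length_decAt (p : List Int) (k : Nat) : (decAt p k).length = p.length := by
  induction p generalizing k with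
  | nil => rfl
  | cons x t ih =>
    cases k with
    | zero => rfl
    | succ k => simpa [decAt] using ih k

theorem drop_decAt (p : List Int) (k : Nat) (h : k < p.length) :
    (decAt p k).drop k = ((p.drop k).headD 0 - 1) :: p.drop (k + 1) := by
  induction p generalizing k with
  | nil => simp at h
  | cons x t ih =>
    cases k with
    | zero => simp [decAt]
    | succ k => simpa [decAt] using ih k (by simpa using h)

theorem pos_of_chain (s : List Int) (hc : s.IsChain (fun a b => b ≤ a))
    (hl : 1 ≤ s.getLastD 0) : ∀ x ∈ s, 1 ≤ x := by
  induction s with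
  | nil => simp
  | cons x t ih =>
    cases t with
    | nil => simpa using hl
    | cons y u =>
      rcases List.isChain_cons.mp hc with ⟨hxy, hc'⟩
      have := ih hc' (by simpa using hl)
      intro z hz
      rcases List.mem_cons.mp hz with rfl | hz
      · exact le_trans (this y (by simp)) (hxy y rfl)
      · exact this z hz

theorem drop_length_sub_one (p : List Int) (h : p ≠ []) :
    p.drop (p.length - 1) = [p.getLastD 0] := by
  induction p with
  | nil => simp at h
  | cons x t ih =>
    cases t with
    | nil => simp
    | cons y u => simpa [List.getLastD_cons] using ih (by simp)

theorem getLastD_cons_ne (x : Int) (t : List Int) (ht : t ≠ []) :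
    (x :: t).getLastD 0 = t.getLastD 0 := by
  cases t with
  | nil => simp at ht
  | cons y u => simp

theorem base_facts (p : List Int) (r : Int) (h : InvSP p r)
    (hb : r = (p.length : Int) - 1) :
    p.drop r.toNat = [p.getLastD 0] ∧
    (decLast p).getLastD 0 = p.getLastD 0 - 1 ∧
    (decLast p).dropLast = p.dropLast ∧
    ((decLast p).getLastD 0 ≠ 0 → InvSP (decLast p) r ∧ M (decLast p) r < M p r) := by
  obtain ⟨hr0, hk, hc, hl⟩ := h
  have hne : p ≠ [] := by cases p <;> simp_all
  have hkk : r.toNat = p.length - 1 := by omega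
  have hdrop : p.drop r.toNat = [p.getLastD 0] := by rw [hkk]; exact drop_length_sub_one p hne
  have hdl : decLast p = p.dropLast ++ [p.getLastD 0 - 1] := decLast_eq p hne
  have hlast : (decLast p).getLastD 0 = p.getLastD 0 - 1 := by
    rw [hdl]; simp [List.getLastD_eq_getLast?]
  have hdlast : (decLast p).dropLast = p.dropLast := by
    rw [hdl]; simp
  have hpl : 1 ≤ p.getLastD 0 := by rw [hdrop] at hl; simpa using hl
  refine ⟨hdrop, hlast, hdlast, fun hz => ?_⟩
  have hlen : (decLast p).length = p.length := length_decLast p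
  have hne' : decLast p ≠ [] := by
    intro hh; rw [hh] at hlen; simp at hlen; omega
  have hdrop' : (decLast p).drop r.toNat = [p.getLastD 0 - 1] := by
    rw [hkk, ← hlen, drop_length_sub_one _ hne', hlast]
  have h2 : 2 ≤ p.getLastD 0 := by
    rw [hlast] at hz; omega
  constructor
  · refine ⟨hr0, by omega, by rw [hdrop']; simp, ?_⟩
    rw [hdrop']
    simp only [List.getLastD_cons, List.getLastD_nil]
    omega
  · unfold M
    rw [hdrop', hdrop, hlen]
    simp only [List.map_cons, List.map_nil, List.sum_cons, List.sum_nil]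
    omega

theorem nonbase_facts (p : List Int) (r : Int) (h : InvSP p r)
    (hb : r ≠ (p.length : Int) - 1) :
    ∃ a b, PySem.List.pyGet? p r = some a ∧ PySem.List.pyGet? p (r + 1) = some b ∧
      b ≤ a ∧
      (InvSP p (r + 1) ∧ M p (r + 1) < M p r) ∧
      (a ≠ b → InvSP (decAt p r.toNat) r ∧ M (decAt p r.toNat) r < M p r) := by
  obtain ⟨hr0, hk, hc, hl⟩ := h
  have hrk : ((r.toNat : Nat) : Int) = r := Int.toNat_of_nonneg hr0
  have hk1 : r.toNat + 1 < p.length := by omega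
  set k := r.toNat with hkdef
  have hga : PySem.List.pyGet? p r = some p[k] := by
    rw [PySem.List.pyGet?_of_nonneg _ hr0, List.getElem?_eq_getElem hk]
  have hgb : PySem.List.pyGet? p (r + 1) = some p[k + 1] := by
    have ht1 : (r + 1).toNat = k + 1 := by omega
    rw [PySem.List.pyGet?_of_nonneg _ (by omega), ht1, List.getElem?_eq_getElem hk1]
  have hdk : p.drop k = p[k] :: p.drop (k + 1) := List.drop_eq_getElem_cons hk
  have hdk1 : p.drop (k + 1) = p[k + 1] :: p.drop (k + 2) := List.drop_eq_getElem_cons hk1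
  have hcc := hc
  rw [hdk] at hcc
  rcases List.isChain_cons.mp hcc with ⟨hhd, hct⟩
  have hba : p[k + 1] ≤ p[k] := hhd _ (by rw [hdk1]; rfl)
  have hhd0 : (p.drop k).headD 0 = p[k] := by rw [hdk]; rfl
  have hne1 : p.drop (k + 1) ≠ [] := by rw [Ne, List.drop_eq_nil_iff]; omega
  have hl1 : 1 ≤ (p.drop (k + 1)).getLastD 0 := by
    have hl' := hl
    rw [hdk, getLastD_cons_ne _ _ hne1] at hl'
    exact hl'
  have hpos : 1 ≤ p[k] := pos_of_chain _ hc hl (p[k]) (by rw [hdk]; exact List.mem_cons_self ..)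
  have ht1 : (r + 1).toNat = k + 1 := by omega
  refine ⟨p[k], p[k + 1], hga, hgb, hba, ⟨⟨by omega, ?_, ?_, ?_⟩, ?_⟩, fun hab => ⟨⟨hr0, ?_, ?_, ?_⟩, ?_⟩⟩
  · rw [ht1]; exact hk1
  · rw [ht1]; exact hct
  · rw [ht1]; exact hl1
  · unfold M
    rw [ht1, hdk]
    simp only [List.map_cons, List.sum_cons]
    omega
  · rw [length_decAt]; exact hk
  · rw [drop_decAt p k hk, hhd0]
    refine List.isChain_cons.mpr ⟨?_, hct⟩
    intro b hbm
    rw [hdk1, List.head?_cons, Option.mem_def, Option.some.injEq] at hbm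
    subst hbm
    omega
  · rw [drop_decAt p k hk, getLastD_cons_ne _ _ hne1]
    exact hl1
  · unfold M
    rw [drop_decAt p k hk, length_decAt, hhd0, hdk]
    simp only [List.map_cons, List.sum_cons]
    omega

-- fuel-stability of the port of A: with enough fuel the result does not depend on the fuel
theorem goA_stab : ∀ m : Nat, ∀ p r f g, InvSP p r → M p r = m → m < f → m < g →
    goA f p r = goA g p r := by
  intro m
  induction m using Nat.strong_induction_on with
  | _ m ih =>
    intro p r f g hInv hM hf hg
    obtain ⟨f', rfl⟩ : ∃ f', f = f' + 1 := ⟨f - 1, by omega⟩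
    obtain ⟨g', rfl⟩ : ∃ g', g = g' + 1 := ⟨g - 1, by omega⟩
    simp only [goA]
    by_cases hb : r = (p.length : Int) - 1
    · rw [if_pos hb, if_pos hb]
      obtain ⟨hdrop, hlast, hdlast, hrec⟩ := base_facts p r hInv hb
      by_cases hz : (decLast p).getLastD 0 = 0
      · rw [if_pos hz, if_pos hz]
      · rw [if_neg hz, if_neg hz]
        obtain ⟨hInv', hlt⟩ := hrec hz
        rw [ih (M (decLast p) r) (by omega) _ _ f' g' hInv' rfl (by omega) (by omega)]
    · rw [if_neg hb, if_neg hb]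
      obtain ⟨a, b, hga, hgb, hba, ⟨hInv1, hlt1⟩, hrec⟩ := nonbase_facts p r hInv hb
      rw [hga, hgb]
      simp only []
      by_cases hab : a = b
      · rw [if_pos hab, if_pos hab,
          ih (M p (r + 1)) (by omega) _ _ f' g' hInv1 rfl (by omega) (by omega)]
      · rw [if_neg hab, if_neg hab]
        obtain ⟨hInv2, hlt2⟩ := hrec hab
        rw [ih (M p (r + 1)) (by omega) _ _ f' g' hInv1 rfl (by omega) (by omega),
          ih (M (decAt p r.toNat) r) (by omega) _ _ f' g' hInv2 rfl (by omega) (by omega)]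

theorem pow3_one (m' m S f : Nat) (h : m' < m) (hf : 3 ^ m + S ≤ f + 1) :
    3 ^ m' + S ≤ f := by
  have h1 : 3 ^ (m' + 1) ≤ 3 ^ m := Nat.pow_le_pow_right (by norm_num) h
  have h2 : 3 ^ (m' + 1) = 3 ^ m' * 3 := pow_succ 3 m'
  have h3 : 1 ≤ 3 ^ m' := Nat.one_le_two_pow.trans (Nat.pow_le_pow_left (by norm_num) m')
  omega

theorem pow3_two (m1 m2 m S f : Nat) (h1 : m1 < m) (h2 : m2 < m)
    (hf : 3 ^ m + S ≤ f + 1) : 3 ^ m1 + (3 ^ m2 + S) ≤ f := by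
  have a1 : 3 ^ (m1 + 1) ≤ 3 ^ m := Nat.pow_le_pow_right (by norm_num) h1
  have a2 : 3 ^ (m2 + 1) ≤ 3 ^ m := Nat.pow_le_pow_right (by norm_num) h2
  have b1 : 3 ^ (m1 + 1) = 3 ^ m1 * 3 := pow_succ 3 m1
  have b2 : 3 ^ (m2 + 1) = 3 ^ m2 * 3 := pow_succ 3 m2
  have c1 : 1 ≤ 3 ^ m1 := Nat.one_le_two_pow.trans (Nat.pow_le_pow_left (by norm_num) m1)
  have c2 : 1 ≤ 3 ^ m2 := Nat.one_le_two_pow.trans (Nat.pow_le_pow_left (by norm_num) m2)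
  have hm : 1 ≤ m := by omega
  have d3 : 3 ≤ 3 ^ m := by
    calc (3:Nat) = 3 ^ 1 := (pow_one 3).symm
    _ ≤ 3 ^ m := Nat.pow_le_pow_right (by norm_num) hm
  omega

-- the stack machine computes the concatenation of the recursion's results over the stack, in order
theorem goB_eq : ∀ f : Nat, ∀ st acc, (∀ x ∈ st, InvSP x.1 x.2) →
    ((st.map fun x => 3 ^ M x.1 x.2).sum ≤ f) →
    goB f st acc = acc ++ (st.map fun x => goA (M x.1 x.2 + 1) x.1 x.2).flatten := by
  intro f
  induction f with
  | zero =>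
    intro st acc h hf
    cases st with
    | nil => simp [goB]
    | cons x st =>
      exfalso
      have : 1 ≤ 3 ^ M x.1 x.2 := Nat.one_le_two_pow.trans (Nat.pow_le_pow_left (by norm_num) _)
      simp only [List.map_cons, List.sum_cons] at hf
      omega
  | succ f ihf =>
    intro st acc hinv hf
    cases st with
    | nil => simp [goB]
    | cons x st =>
      obtain ⟨p, r⟩ := x
      have hInv := hinv (p, r) (List.mem_cons_self ..)
      have hinv' : ∀ x ∈ st, InvSP x.1 x.2 := fun x hx => hinv x (List.mem_cons_of_mem _ hx)
      simp only [List.map_cons, List.sum_cons] at hf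
      simp only [goB, List.map_cons, List.flatten_cons]
      by_cases hb : r = (p.length : Int) - 1
      · rw [if_pos hb]
        obtain ⟨hdrop, hlast, hdlast, hrec⟩ := base_facts p r hInv hb
        by_cases hz : (decLast p).getLastD 0 = 0
        · rw [if_pos hz]
          have hA : goA (M p r + 1) p r = [p, (decLast p).dropLast] := by
            conv_lhs => rw [goA]
            rw [if_pos hb, if_pos hz]
          rw [ihf st _ hinv' (by
              have h1 : 1 ≤ 3 ^ M p r := Nat.one_le_two_pow.trans (Nat.pow_le_pow_left (by norm_num) _)
              omega), hA]
          simp [List.append_assoc]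
        · rw [if_neg hz]
          obtain ⟨hInv', hlt⟩ := hrec hz
          have hA : goA (M p r + 1) p r = p :: goA (M (decLast p) r + 1) (decLast p) r := by
            conv_lhs => rw [goA]
            rw [if_pos hb, if_neg hz,
              goA_stab (M (decLast p) r) (decLast p) r (M p r) (M (decLast p) r + 1) hInv' rfl hlt (by omega)]
          rw [ihf ((decLast p, r) :: st) (acc ++ [p]) (by
              intro x hx
              rcases List.mem_cons.mp hx with rfl | hx
              · exact hInv'
              · exact hinv' x hx)
            (by simpa using pow3_one (M (decLast p) r) (M p r) _ f hlt hf), hA]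
          simp [List.append_assoc]
      · rw [if_neg hb]
        obtain ⟨a, b, hga, hgb, hba, ⟨hInv1, hlt1⟩, hrec⟩ := nonbase_facts p r hInv hb
        rw [hga, hgb]
        simp only []
        by_cases hab : a = b
        · rw [if_pos hab]
          have hA : goA (M p r + 1) p r = goA (M p (r + 1) + 1) p (r + 1) := by
            conv_lhs => rw [goA]
            rw [if_neg hb, hga, hgb]
            simp only []
            rw [if_pos hab,
              goA_stab (M p (r + 1)) p (r + 1) (M p r) (M p (r + 1) + 1) hInv1 rfl hlt1 (by omega)]
          rw [ihf ((p, r + 1) :: st) acc (by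
              intro x hx
              rcases List.mem_cons.mp hx with rfl | hx
              · exact hInv1
              · exact hinv' x hx)
            (by simpa using pow3_one (M p (r + 1)) (M p r) _ f hlt1 hf), hA]
          simp
        · rw [if_neg hab]
          obtain ⟨hInv2, hlt2⟩ := hrec hab
          have hA : goA (M p r + 1) p r =
              goA (M p (r + 1) + 1) p (r + 1) ++ goA (M (decAt p r.toNat) r + 1) (decAt p r.toNat) r := by
            conv_lhs => rw [goA]
            rw [if_neg hb, hga, hgb]
            simp only []
            rw [if_neg hab,
              goA_stab (M p (r + 1)) p (r + 1) (M p r) (M p (r + 1) + 1) hInv1 rfl hlt1 (by omega),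
              goA_stab (M (decAt p r.toNat) r) (decAt p r.toNat) r (M p r) (M (decAt p r.toNat) r + 1) hInv2 rfl hlt2 (by omega)]
          rw [ihf ((p, r + 1) :: (decAt p r.toNat, r) :: st) acc (by
              intro x hx
              rcases List.mem_cons.mp hx with rfl | hx
              · exact hInv1
              rcases List.mem_cons.mp hx with rfl | hx
              · exact hInv2
              · exact hinv' x hx)
            (by simpa using pow3_two (M p (r + 1)) (M (decAt p r.toNat) r) (M p r) _ f hlt1 hlt2 hf), hA]
          simp [List.append_assoc]

theorem sum_toNat_le_sumAbs (xs : List Int) :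
    (xs.map Int.toNat).sum ≤ sumAbs xs := by
  induction xs with
  | nil => simp [sumAbs]
  | cons x t ih =>
    simp only [sumAbs, List.map_cons, List.sum_cons] at *
    have : x.toNat ≤ x.natAbs := by omega
    omega

theorem final (lda : List Int) (curRow : Int) (hp : Pre_subPartition lda curRow) :
    subPartition lda curRow = subPartition_alt lda curRow := by
  obtain ⟨h0, h1, h2, h3⟩ := hp
  have hInv : InvSP lda curRow := ⟨h0, by omega, h2, h3⟩
  have hM : M lda curRow ≤ sumAbs (lda.drop curRow.toNat) + lda.length := by
    unfold M
    have := sum_toNat_le_sumAbs (lda.drop curRow.toNat)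
    omega
  have hA : subPartition lda curRow = goA (M lda curRow + 1) lda curRow := by
    unfold subPartition fuelA
    exact goA_stab (M lda curRow) lda curRow _ _ hInv rfl (by omega) (by omega)
  have hB : subPartition_alt lda curRow = goA (M lda curRow + 1) lda curRow := by
    unfold subPartition_alt
    rw [goB_eq _ [(lda, curRow)] [] (by
        intro x hx
        rcases List.mem_cons.mp hx with rfl | hx
        · exact hInv
        · simp at hx)
      (by
        simp only [List.map_cons, List.map_nil, List.sum_cons, List.sum_nil]
        have := Nat.pow_le_pow_right (show 1 ≤ 3 by norm_num) (hM.trans (by omega) : M lda curRow ≤ sumAbs (lda.drop curRow.toNat) + lda.length + 1)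
        omega)]
    simp
  rw [hA, hB]

-- ===== VERDICT (by name: the statement is the Claim_ definition above) =====
theorem subPartition_spec : Claim_equal_subPartition := by
  intro lda curRow _hDom hPre
  unfold Spec_subPartition
  exact final lda curRow hPre
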